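-- pv_equiv track=rewrite | github.com/Algos-ICT/lab-2_1-nikita-kuznetsov | task21.py | can_beat_cards
-- ===== SOURCE A (Python) =====
-- RANKS = "6789TJQKA"
--
-- def check_same_colour(cards, card_to_beat):
--     return [card for card in cards
--             if card[1] == card_to_beat[1]
--             and RANKS.index(card[0]) > RANKS.index(card_to_beat[0])]
--
-- def get_trump_cards(cards, trump_colour):
--     return [card for card in cards
--             if card[1] == trump_colour]
--
-- def get_beating_cards(my_cards, opponent_cards):
--     beating_cards = []
--     for op_card in opponent_cards:
--         beating_cards += check_same_colour(my_cards, op_card)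
--     return list(set(beating_cards))
--
-- def can_beat_cards(trump_colour, my_cards, op_cards):
--     my_trumps = get_trump_cards(my_cards, trump_colour)
--     op_trumps = get_trump_cards(op_cards, trump_colour)
--
--     my_cards = [card for card in my_cards if card not in my_trumps]
--     op_cards = [card for card in op_cards if card not in op_trumps]
--
--     beating_trumps = get_beating_cards(my_trumps, op_trumps)
--     beating_cards = get_beating_cards(my_cards, op_cards)
--
--     if len(beating_trumps) >= len(op_trumps):
--
--         extra_trumps = beating_trumps[len(beating_trumps)-1:] \
--             if len(beating_trumps) > len(op_trumps) \
--             else []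
--
--         if len(beating_cards) >= len(op_cards):
--             return "YES"
--         else:
--             my_trumps = [trump for trump in my_trumps if trump not in beating_trumps] + extra_trumps
--             if len(beating_cards) + len(my_trumps) >= len(op_cards):
--                 return "YES"
--
--     return "NO"
-- ===== SOURCE B (Python) =====
-- RANKS = "6789TJQKA"
--
-- def can_beat_cards(trump_colour, my_cards, op_cards):
--     my_trumps = [c for c in my_cards if c[1] == trump_colour]
--     my_plain = [c for c in my_cards if c[1] != trump_colour]
--     op_trumps = [c for c in op_cards if c[1] == trump_colour]
--     op_plain = [c for c in op_cards if c[1] != trump_colour]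
--
--     # one pass over opponent plain cards: minimum rank index per colour
--     mins = {}
--     for c in op_plain:
--         r = RANKS.find(c[0])
--         if c[1] not in mins or r < mins[c[1]]:
--             mins[c[1]] = r
--
--     n_beat = len({c for c in my_plain
--                   if c[1] in mins and RANKS.find(c[0]) > mins[c[1]]})
--
--     tmin = min((RANKS.find(c[0]) for c in op_trumps), default=None)
--     beating_trumps = {c for c in my_trumps
--                       if tmin is not None and RANKS.find(c[0]) > tmin}
--
--     if len(beating_trumps) < len(op_trumps):
--         return "NO"
--     spare = sum(1 for t in my_trumps if t not in beating_trumps) \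
--         + (1 if len(beating_trumps) > len(op_trumps) else 0)
--     if n_beat >= len(op_plain) or n_beat + spare >= len(op_plain):
--         return "YES"
--     return "NO"
-- ===== Notes on version B (the rewrite author's own statement) =====
-- stated objective: alternative
-- what changed: A collects, per opponent card, the list of my same-colour higher cards via nested scans and deduplicates it; B makes one pass over the opponent cards recording the minimum rank per colour (a dict, a scalar for trumps) and then classifies each of my cards in a single filter pass, comparing only counts.
import Mathlib
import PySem

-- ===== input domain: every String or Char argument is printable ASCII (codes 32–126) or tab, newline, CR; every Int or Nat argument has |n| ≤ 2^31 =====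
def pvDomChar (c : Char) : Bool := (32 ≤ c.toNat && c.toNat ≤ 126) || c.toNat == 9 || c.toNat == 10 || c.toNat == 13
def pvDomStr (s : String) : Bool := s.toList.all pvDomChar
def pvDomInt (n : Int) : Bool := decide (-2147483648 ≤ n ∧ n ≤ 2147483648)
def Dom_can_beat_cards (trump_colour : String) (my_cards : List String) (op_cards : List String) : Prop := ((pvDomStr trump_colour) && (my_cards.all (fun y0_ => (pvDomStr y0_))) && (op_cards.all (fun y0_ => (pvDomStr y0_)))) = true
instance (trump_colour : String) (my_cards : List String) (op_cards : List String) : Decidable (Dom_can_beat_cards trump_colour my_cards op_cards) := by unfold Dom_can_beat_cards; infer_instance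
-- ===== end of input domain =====

-- B replaces A's nested opponent×mine scans by one pass over the opponent cards recording the
-- minimum opponent rank per colour (a dict / a scalar for trumps) and single filter passes over
-- my cards; same return value on every input Pre_ admits.
-- Shared card accessors used by both ports (they transliterate `card[0]`, `card[1]` and
-- `RANKS.index(card[0])`/`RANKS.find(card[0])` of the sources).  A's `RANKS.index` raises where
-- the char is absent; Pre_ excludes every input on which such a call is evaluated, and on the
-- admitted inputs `find` = `index`, so the port uses `find` (exact there).
def cardRank (card : String) : Int :=
  match PySem.Str.pyGet? card 0 with
  | some c => PySem.Chars.find "6789TJQKA".toList [c]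
  | none => -1

def cardColour (card : String) : Option Char := PySem.Str.pyGet? card 1

def cardColourStr (card : String) : String :=
  match PySem.Str.pyGet? card 1 with
  | some c => String.ofList [c]
  | none => ""


-- ===== PORT A =====
def check_same_colour (cards : List String) (card_to_beat : String) : List String :=
  cards.filter (fun card =>
    cardColour card == cardColour card_to_beat && decide (cardRank card > cardRank card_to_beat))

def get_trump_cards (cards : List String) (trump_colour : String) : List String :=
  cards.filter (fun card => cardColourStr card == trump_colour)

def get_beating_cards (my_cards : List String) (opponent_cards : List String) : List String :=
  PySem.Set.ofList
    (opponent_cards.foldl (fun acc op_card => acc ++ check_same_colour my_cards op_card) [])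

def can_beat_cards (trump_colour : String) (my_cards : List String) (op_cards : List String) : String :=
  let my_trumps := get_trump_cards my_cards trump_colour
  let op_trumps := get_trump_cards op_cards trump_colour
  let my_cards2 := my_cards.filter (fun card => !(my_trumps.contains card))
  let op_cards2 := op_cards.filter (fun card => !(op_trumps.contains card))
  let beating_trumps := get_beating_cards my_trumps op_trumps
  let beating_cards := get_beating_cards my_cards2 op_cards2
  if beating_trumps.length ≥ op_trumps.length then
    let extra_trumps :=
      if beating_trumps.length > op_trumps.length then
        PySem.List.slice beating_trumps (some ((beating_trumps.length : Int) - 1)) none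
      else []
    if beating_cards.length ≥ op_cards2.length then "YES"
    else
      let my_trumps2 := my_trumps.filter (fun t => !(beating_trumps.contains t)) ++ extra_trumps
      if beating_cards.length + my_trumps2.length ≥ op_cards2.length then "YES" else "NO"
  else "NO"

-- ===== PORT B =====
def can_beat_cards_alt (trump_colour : String) (my_cards : List String) (op_cards : List String) : String :=
  let my_trumps := my_cards.filter (fun c => cardColourStr c == trump_colour)
  let my_plain := my_cards.filter (fun c => !(cardColourStr c == trump_colour))
  let op_trumps := op_cards.filter (fun c => cardColourStr c == trump_colour)
  let op_plain := op_cards.filter (fun c => !(cardColourStr c == trump_colour))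
  let mins : PySem.Dict (Option Char) Int :=
    op_plain.foldl (fun d c =>
      let r := cardRank c
      match d.get? (cardColour c) with
      | none => d.insert (cardColour c) r
      | some m => if r < m then d.insert (cardColour c) r else d) PySem.Dict.empty
  let n_beat :=
    (PySem.Set.ofList (my_plain.filter (fun c =>
      (mins.get? (cardColour c)).elim false (fun m => decide (cardRank c > m))))).length
  let tmin := PySem.List.min? (op_trumps.map cardRank) (fun x => x)
  let beating_trumps :=
    PySem.Set.ofList (my_trumps.filter (fun c =>
      tmin.elim false (fun m => decide (cardRank c > m))))
  if beating_trumps.length < op_trumps.length then "NO"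
  else
    let spare := my_trumps.countP (fun t => !(beating_trumps.contains t))
      + (if beating_trumps.length > op_trumps.length then 1 else 0)
    if n_beat ≥ op_plain.length ∨ n_beat + spare ≥ op_plain.length then "YES" else "NO"


-- ===== PRECONDITION & SPEC =====
-- Exactly the inputs on which the Python A returns: every card has at least 2 characters (else
-- `card[1]` raises IndexError), and whenever a my-card and an op-card share their colour
-- character both their rank characters are in RANKS (else `RANKS.index` raises ValueError on
-- that same-colour pair, which A always evaluates).
def Pre_can_beat_cards (trump_colour : String) (my_cards : List String) (op_cards : List String) : Prop :=
  (my_cards.all (fun c => 2 ≤ c.toList.length) &&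
   op_cards.all (fun c => 2 ≤ c.toList.length) &&
   my_cards.all (fun m => op_cards.all (fun o =>
     !(PySem.Str.pyGet? m 1 == PySem.Str.pyGet? o 1) ||
       ((m.toList.take 1).all (fun ch => ch ∈ "6789TJQKA".toList) &&
        (o.toList.take 1).all (fun ch => ch ∈ "6789TJQKA".toList))))) = true
instance (trump_colour : String) (my_cards : List String) (op_cards : List String) : Decidable (Pre_can_beat_cards trump_colour my_cards op_cards) := by unfold Pre_can_beat_cards; infer_instance

def pvWitness_can_beat_cards : String × List String × List String := ("S", ["AS", "7H"], ["6S", "KH"])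

def Spec_can_beat_cards (trump_colour : String) (my_cards : List String) (op_cards : List String) (out : String) : Prop := out = can_beat_cards_alt trump_colour my_cards op_cards
instance (trump_colour : String) (my_cards : List String) (op_cards : List String) (out : String) : Decidable (Spec_can_beat_cards trump_colour my_cards op_cards out) := by unfold Spec_can_beat_cards; infer_instance

-- ===== CLAIM (what is proved, stated in full; the proofs are below) =====
def Claim_equal_can_beat_cards : Prop := ∀ (trump_colour : String) (my_cards : List String) (op_cards : List String), Dom_can_beat_cards trump_colour my_cards op_cards → Pre_can_beat_cards trump_colour my_cards op_cards → Spec_can_beat_cards trump_colour my_cards op_cards (can_beat_cards trump_colour my_cards op_cards)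

-- ===== LEMMAS AND PROOFS =====

def ominI : Option Int → Option Int → Option Int
  | none, b => b
  | some x, none => some x
  | some x, some y => some (min x y)

theorem min?_id_cons_omin (a : Int) (t : List Int) :
    PySem.List.min? (a :: t) (fun x => x) = ominI (some a) (PySem.List.min? t (fun x => x)) := by
  cases t with
  | nil =>
    have hM : PySem.List.min? ([] : List Int) (fun x : Int => x) = none :=
      (PySem.List.min?_eq_none_iff _ _).mpr rfl
    simp [PySem.List.min?_id_cons, ominI, hM]
  | cons b t' =>
    rw [PySem.List.min?_id_cons, PySem.List.min?_id_cons]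
    simp only [List.foldl_cons, ominI]
    rw [List.foldl_assoc]

theorem gtMin (l : List Int) (r : Int) :
    ((PySem.List.min? l (fun x => x)).elim false (fun m => decide (r > m)) = true)
      ↔ ∃ a ∈ l, a < r := by
  cases h : PySem.List.min? l (fun x => x) with
  | none =>
    have : l = [] := (PySem.List.min?_eq_none_iff _ _).mp h
    subst this; simp
  | some m =>
    simp only [Option.elim_some, decide_eq_true_eq]
    constructor
    · intro hm; exact ⟨m, PySem.List.min?_mem h, hm⟩
    · rintro ⟨a, ha, har⟩; exact lt_of_le_of_lt (PySem.List.min?_isMin h a ha) har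

theorem ominI_absorb_left {m r : Int} (h : r ≤ m) (z : Option Int) :
    ominI (some m) (ominI (some r) z) = ominI (some r) z := by
  cases z <;> simp [ominI] <;> omega

theorem ominI_absorb_right {m r : Int} (h : m ≤ r) (z : Option Int) :
    ominI (some m) (ominI (some r) z) = ominI (some m) z := by
  cases z <;> simp [ominI] <;> omega

theorem mins_get? (l : List String) (d : PySem.Dict (Option Char) Int) (k : Option Char) :
    (l.foldl (fun d c =>
        let r := cardRank c
        match d.get? (cardColour c) with
        | none => d.insert (cardColour c) r
        | some m => if r < m then d.insert (cardColour c) r else d) d).get? k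
      = ominI (d.get? k)
          (PySem.List.min? ((l.filter (fun c => cardColour c == k)).map cardRank) (fun x => x)) := by
  induction l generalizing d with
  | nil =>
    have hM : PySem.List.min? ([] : List Int) (fun x : Int => x) = none :=
      (PySem.List.min?_eq_none_iff _ _).mpr rfl
    cases h : d.get? k <;> simp [ominI, hM, h]
  | cons c l ih =>
    rw [List.foldl_cons]
    by_cases hk : cardColour c = k
    · subst hk
      cases hd : d.get? (cardColour c) with
      | none =>
        simp only [ih, PySem.Dict.get?_insert_self, List.filter_cons, beq_self_eq_true,
          if_true, List.map_cons, min?_id_cons_omin]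
        rfl
      | some m =>
        by_cases hr : cardRank c < m
        · simp only [if_pos hr, ih, PySem.Dict.get?_insert_self, List.filter_cons,
            beq_self_eq_true, if_true, List.map_cons, min?_id_cons_omin]
          exact (ominI_absorb_left (le_of_lt hr) _).symm
        · simp only [hd, if_neg hr, ih, List.filter_cons, beq_self_eq_true, if_true,
            List.map_cons, min?_id_cons_omin]
          exact (ominI_absorb_right (by omega) _).symm
    · have hbeq : (cardColour c == k) = false := by simp [hk]
      cases hd : d.get? (cardColour c) with
      | none =>
        simp only [ih, List.filter_cons, hbeq, Bool.false_eq_true, if_false]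
        rw [PySem.Dict.get?_insert_of_ne _ _ (Ne.symm hk)]
      | some m =>
        by_cases hr : cardRank c < m
        · simp only [if_pos hr, ih, List.filter_cons, hbeq, Bool.false_eq_true, if_false]
          rw [PySem.Dict.get?_insert_of_ne _ _ (Ne.symm hk)]
        · simp only [if_neg hr, ih, List.filter_cons, hbeq, Bool.false_eq_true, if_false]

theorem colourStr_inj {a b : String} (h : cardColourStr a = cardColourStr b) :
    cardColour a = cardColour b := by
  unfold cardColourStr at h
  unfold cardColour
  cases ha : PySem.Str.pyGet? a 1 <;> cases hb : PySem.Str.pyGet? b 1 <;> rw [ha, hb] at h <;>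
    first
    | rfl
    | (have h2 := congrArg String.toList h
       simp at h2
       exact congrArg some h2)
    | (have h2 := congrArg String.toList h
       simp at h2)

theorem memA (mt ot : List String) (x : String) :
    (x ∈ PySem.Set.ofList (ot.foldl (fun acc op_card => acc ++ mt.filter (fun card =>
        cardColour card == cardColour op_card && decide (cardRank card > cardRank op_card))) []))
      ↔ x ∈ mt ∧ ∃ o ∈ ot, cardRank o < cardRank x ∧ cardColour x = cardColour o := by
  rw [PySem.List.foldl_append_eq_flatMap]
  simp only [PySem.Set.mem_ofList, List.nil_append, List.mem_flatMap, List.mem_filter,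
    Bool.and_eq_true, beq_iff_eq, decide_eq_true_eq, gt_iff_lt]
  tauto

theorem memB (mt : List String) (Q : String → Bool) (x : String) :
    x ∈ PySem.Set.ofList (mt.filter Q) ↔ x ∈ mt ∧ Q x = true := by
  simp [PySem.Set.mem_ofList, List.mem_filter]

theorem nodup_beating (a b : List String) : (get_beating_cards a b).Nodup := by
  unfold get_beating_cards; exact PySem.Set.nodup_ofList _

theorem trump_mem (tc : String) (my op : List String) (x : String) :
    (x ∈ get_beating_cards (my.filter (fun c => cardColourStr c == tc))
        (op.filter (fun c => cardColourStr c == tc)))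
      ↔ x ∈ PySem.Set.ofList ((my.filter (fun c => cardColourStr c == tc)).filter (fun c =>
          (PySem.List.min? ((op.filter (fun c => cardColourStr c == tc)).map cardRank)
              (fun x => x)).elim false (fun m => decide (cardRank c > m)))) := by
  unfold get_beating_cards check_same_colour
  rw [memA, memB]
  constructor
  · rintro ⟨hxm, o, ho, hlt, _⟩
    refine ⟨hxm, ?_⟩
    rw [gtMin]
    exact ⟨cardRank o, List.mem_map_of_mem ho, hlt⟩
  · rintro ⟨hxm, hq⟩
    rw [gtMin] at hq
    obtain ⟨a, ha, hlt⟩ := hq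
    rw [List.mem_map] at ha
    obtain ⟨o, ho, rfl⟩ := ha
    refine ⟨hxm, o, ho, hlt, ?_⟩
    have hx : cardColourStr x = tc := by
      have := (List.mem_filter.mp hxm).2; exact eq_of_beq this
    have ho2 : cardColourStr o = tc := by
      have := (List.mem_filter.mp ho).2; exact eq_of_beq this
    exact colourStr_inj (hx.trans ho2.symm)

theorem plain_mem (tc : String) (my op : List String) (x : String) :
    (x ∈ get_beating_cards (my.filter (fun c => !(cardColourStr c == tc)))
        (op.filter (fun c => !(cardColourStr c == tc))))
      ↔ x ∈ PySem.Set.ofList ((my.filter (fun c => !(cardColourStr c == tc))).filter (fun c =>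
          (((op.filter (fun c => !(cardColourStr c == tc))).foldl (fun d c =>
              let r := cardRank c
              match d.get? (cardColour c) with
              | none => d.insert (cardColour c) r
              | some m => if r < m then d.insert (cardColour c) r else d)
            PySem.Dict.empty).get? (cardColour c)).elim false
            (fun m => decide (cardRank c > m)))) := by
  unfold get_beating_cards check_same_colour
  rw [memA, memB]
  have hm : ∀ (c : String),
      (((op.filter (fun c => !(cardColourStr c == tc))).foldl (fun d c =>
          let r := cardRank c
          match d.get? (cardColour c) with
          | none => d.insert (cardColour c) r
          | some m => if r < m then d.insert (cardColour c) r else d)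
        PySem.Dict.empty).get? (cardColour c))
        = PySem.List.min? (((op.filter (fun c => !(cardColourStr c == tc))).filter
            (fun o => cardColour o == cardColour c)).map cardRank) (fun x => x) := by
    intro c
    rw [mins_get?, PySem.Dict.get?_empty]
    rfl
  constructor
  · rintro ⟨hxm, o, ho, hlt, hcol⟩
    refine ⟨hxm, ?_⟩
    rw [hm, gtMin]
    exact ⟨cardRank o, List.mem_map.mpr ⟨o, List.mem_filter.mpr ⟨ho, by simp [hcol]⟩, rfl⟩, hlt⟩
  · rintro ⟨hxm, hq⟩
    rw [hm, gtMin] at hq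
    obtain ⟨a, ha, hlt⟩ := hq
    rw [List.mem_map] at ha
    obtain ⟨o, ho, rfl⟩ := ha
    have ho2 := List.mem_filter.mp ho
    exact ⟨hxm, o, ho2.1, hlt, (eq_of_beq ho2.2).symm⟩

theorem slice_last_len (l : List String) (h : 1 ≤ l.length) :
    (PySem.List.slice l (some ((l.length : Int) - 1)) none).length = 1 := by
  rw [PySem.List.slice_from l (a := (l.length : Int) - 1) (by omega)]
  simp [List.length_drop]
  omega

theorem core (tc : String) (my op : List String) :
    can_beat_cards tc my op = can_beat_cards_alt tc my op := by
  have hconts : ∀ (l₁ l₂ : List String), (∀ a, a ∈ l₁ ↔ a ∈ l₂) →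
      ∀ x, l₁.contains x = l₂.contains x := by
    intro l₁ l₂ h x
    rw [Bool.eq_iff_iff]
    simp [h x]
  have hplainf : ∀ (l : List String),
      (l.filter (fun card => !((l.filter (fun c => cardColourStr c == tc)).contains card)))
        = l.filter (fun c => !(cardColourStr c == tc)) := by
    intro l
    apply List.filter_congr
    intro x hx
    have hc : (l.filter (fun c => cardColourStr c == tc)).contains x = (cardColourStr x == tc) := by
      rw [Bool.eq_iff_iff]
      simp [List.mem_filter, hx]
    rw [hc]
  unfold can_beat_cards can_beat_cards_alt get_trump_cards
  simp only []
  rw [hplainf my, hplainf op]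
  set mt := my.filter (fun card => cardColourStr card == tc) with hmtd
  set ot := op.filter (fun card => cardColourStr card == tc) with hotd
  set mp := my.filter (fun c => !(cardColourStr c == tc)) with hmpd
  set opl := op.filter (fun c => !(cardColourStr c == tc)) with hopld
  set btA := get_beating_cards mt ot with hbtAd
  set bcA := get_beating_cards mp opl with hbcAd
  set btB := PySem.Set.ofList (mt.filter (fun c =>
      (PySem.List.min? (ot.map cardRank) (fun x => x)).elim false
        (fun m => decide (cardRank c > m)))) with hbtBd
  set bcB := PySem.Set.ofList (mp.filter (fun c =>
      ((opl.foldl (fun d c =>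
          let r := cardRank c
          match d.get? (cardColour c) with
          | none => d.insert (cardColour c) r
          | some m => if r < m then d.insert (cardColour c) r else d)
        PySem.Dict.empty).get? (cardColour c)).elim false
        (fun m => decide (cardRank c > m)))) with hbcBd
  have hT := trump_mem tc my op
  rw [← hmtd, ← hotd, ← hbtAd, ← hbtBd] at hT
  have hP := plain_mem tc my op
  rw [← hmpd, ← hopld, ← hbcAd, ← hbcBd] at hP
  have hbt : btA.length = btB.length :=
    (List.perm_ext_iff_of_nodup (by rw [hbtAd]; exact nodup_beating _ _)
      (by rw [hbtBd]; exact PySem.Set.nodup_ofList _) |>.mpr hT).length_eq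
  have hbc : bcA.length = bcB.length :=
    (List.perm_ext_iff_of_nodup (by rw [hbcAd]; exact nodup_beating _ _)
      (by rw [hbcBd]; exact PySem.Set.nodup_ofList _) |>.mpr hP).length_eq
  have hcT : ∀ x, btA.contains x = btB.contains x := hconts _ _ hT
  simp only [hcT]
  simp only [List.countP_eq_length_filter]
  have hex : (List.filter (fun t => !btB.contains t) mt ++
        (if btA.length > ot.length then
          PySem.List.slice btA (some ((btA.length : Int) - 1)) none
        else [])).length
      = (List.filter (fun t => !btB.contains t) mt).length
        + (if btA.length > ot.length then 1 else 0) := by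
    by_cases hc : btA.length > ot.length
    · rw [if_pos hc, if_pos hc, List.length_append, slice_last_len _ (by omega)]
    · rw [if_neg hc, if_neg hc, List.append_nil]
      omega
  rw [hex, hbt, hbc]
  split_ifs <;> first | rfl | (exfalso; omega)

-- ===== VERDICT (by name: the statement is the Claim_ definition above) =====
theorem can_beat_cards_spec : Claim_equal_can_beat_cards := by
  intro tc my op _ _
  unfold Spec_can_beat_cards
  exact core tc my op
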